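-- pv_equiv track=rewrite | github.com/bong6981/algorithms_websites | programmers/python/level3/dfs_bfs/trip_route.py | solution
-- ===== SOURCE A (Python) =====
-- from collections import defaultdict, deque
--
-- def solution(tickets):
--     tickets.sort()
--     info = defaultdict(deque)
--
--     for i, t in enumerate(tickets):
--         s = t[0]
--         e = t[1]
--         info[s].append(i)
--
--     visited = [0] * len(tickets)
--     def dfs(arr):
--         if len(arr) == len(tickets) + 1:
--             return arr
--
--         start = arr[-1]
--         for i in info[start]:
--             if not visited[i]:
--                 des = tickets[i][1]
--                 visited[i] = True
--                 ret = dfs(arr+[des])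
--
--                 if ret != []:
--                     return ret
--                 visited[i] = False
--         return []
--
--     return dfs(["ICN"])
-- ===== SOURCE B (Python) =====
-- def solution(tickets):
--     # Breadth-first level expansion: after k rounds the frontier holds every
--     # partial trail of k+1 airports from "ICN" together with its remaining
--     # ticket counter; after len(tickets) rounds every surviving path used all
--     # tickets, and min() picks the lexicographically smallest (no sorting, no
--     # recursion, no backtracking).
--     n = len(tickets)
--     cnt = {}
--     for t in tickets:
--         k = (t[0], t[1])
--         cnt[k] = cnt.get(k, 0) + 1
--     frontier = [(["ICN"], cnt)]
--     for _ in range(n):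
--         nxt = []
--         for path, c in frontier:
--             node = path[-1]
--             for (s, e), k in c.items():
--                 if s == node and k > 0:
--                     c2 = dict(c)
--                     c2[(s, e)] = k - 1
--                     nxt.append((path + [e], c2))
--         frontier = nxt
--     paths = [p for p, _ in frontier]
--     return min(paths) if paths else []
-- ===== Notes on version B (the rewrite author's own statement) =====
-- stated objective: alternative
-- what changed: A is a recursive backtracking DFS over sorted ticket indices with a visited array returning the first completed route; B never sorts, recurses or backtracks: it expands a frontier of (partial path, remaining ticket counter) states level by level for len(tickets) rounds and returns min() of the surviving full routes.
import Mathlib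
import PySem

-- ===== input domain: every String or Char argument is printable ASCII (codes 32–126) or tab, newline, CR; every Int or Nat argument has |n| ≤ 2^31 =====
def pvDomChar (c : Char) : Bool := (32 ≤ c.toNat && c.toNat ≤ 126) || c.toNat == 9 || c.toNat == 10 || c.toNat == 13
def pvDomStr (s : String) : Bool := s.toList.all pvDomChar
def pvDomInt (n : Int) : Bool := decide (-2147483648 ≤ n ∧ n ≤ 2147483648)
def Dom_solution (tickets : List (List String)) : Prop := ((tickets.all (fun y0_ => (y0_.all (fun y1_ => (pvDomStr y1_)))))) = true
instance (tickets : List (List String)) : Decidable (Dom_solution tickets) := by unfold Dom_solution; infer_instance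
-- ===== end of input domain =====

-- B replaces A's sorted backtracking DFS by an iterative breadth-first frontier expansion over
-- (partial path, remaining ticket counter) states with a final min(); equal return values are
-- proved; A additionally sorts its `tickets` argument in place, which B does not do (the claim is
-- about the return value only).

-- ===== PORT A =====
-- A sorts tickets, buckets ticket indices by source airport (the dict `info`), and runs a
-- backtracking dfs over unvisited ticket indices.  The dfs recursion is ported with a fuel
-- parameter; recursion depth is at most len(tickets)+1, so fuel = len(tickets)+1 is never
-- exhausted.  `visited` holds Python's 0/True values as Bool; enumerate indices are the Ints
-- 0..n-1, read/written with pyGetD/pySetD (always in range).  The Python dfs mutates `visited`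
-- in place; the port threads it through and returns it alongside the result.
def pvInfoA (ts : List (List String)) : PySem.Dict String (List Int) :=
  (PySem.List.enumerate ts).foldl
    (fun d p => d.modify (PySem.List.pyGetD p.2 0 "") [] (· ++ [p.1])) PySem.Dict.empty

mutual
def pvDfsA (ts : List (List String)) (info : PySem.Dict String (List Int)) (n : Nat) :
    Nat → List String → List Bool → (List String × List Bool)
  | fuel, arr, visited =>
    if arr.length = n + 1 then (arr, visited)
    else
      match fuel with
      | 0 => ([], visited)
      | fuel + 1 =>
        let start := PySem.List.pyGetD arr (-1) ""
        pvLoopA ts info n fuel arr visited (info.getD start [])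
  termination_by fuel _ _ => (fuel, 0)

def pvLoopA (ts : List (List String)) (info : PySem.Dict String (List Int)) (n : Nat) :
    Nat → List String → List Bool → List Int → (List String × List Bool)
  | _fuel, _arr, visited, [] => ([], visited)
  | fuel, arr, visited, i :: is =>
    if PySem.List.pyGetD visited i false then
      pvLoopA ts info n fuel arr visited is
    else
      let des := PySem.List.pyGetD (PySem.List.pyGetD ts i []) 1 ""
      let v1 := PySem.List.pySetD visited i true
      let r := pvDfsA ts info n fuel (arr ++ [des]) v1
      if r.1 ≠ [] then r
      else pvLoopA ts info n fuel arr (PySem.List.pySetD r.2 i false) is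
  termination_by fuel _ _ is => (fuel, is.length + 1)
end

def solution (tickets : List (List String)) : List String :=
  let ts := PySem.List.sorted tickets (fun t => t) false
  (pvDfsA ts (pvInfoA ts) ts.length (ts.length + 1) ["ICN"] (List.replicate ts.length false)).1

-- ===== PORT B =====
-- B counts the tickets into a dict `cnt` keyed by (src, dst), then expands a frontier of
-- (path, remaining counter) states level by level, n = len(tickets) times: every state is
-- replaced by one successor per dict item (s, e) ↦ k with s = path[-1] and k > 0 (the two
-- nested `for` loops of one round are the two flatMaps of pvStepB; Python's `dict(c)` copy is
-- the identity on the persistent Dict).  After n rounds `min(paths)` of the surviving full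
-- routes is returned, [] if there are none.
def pvStepB (states : List (List String × PySem.Dict (String × String) Int)) :
    List (List String × PySem.Dict (String × String) Int) :=
  states.flatMap (fun st =>
    let node := PySem.List.pyGetD st.1 (-1) ""
    st.2.items.flatMap (fun it =>
      if it.1.1 = node ∧ 0 < it.2 then
        [(st.1 ++ [it.1.2], st.2.insert it.1 (it.2 - 1))]
      else []))

def solution_alt (tickets : List (List String)) : List String :=
  let n := tickets.length
  let cnt := tickets.foldl (fun d t =>
    let k := (PySem.List.pyGetD t 0 "", PySem.List.pyGetD t 1 "")
    d.insert k (d.getD k 0 + 1)) PySem.Dict.empty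
  let frontier := (PySem.List.pyRange 0 (n : Int) 1).foldl
    (fun fr _ => pvStepB fr) [(["ICN"], cnt)]
  let paths := frontier.map (fun st => st.1)
  match PySem.List.min? paths (fun p => p) with
  | some p => p
  | none => []

-- ===== PRECONDITION & SPEC =====
-- Python A evaluates t[0] and t[1] for every ticket t, so it raises IndexError on any ticket
-- with fewer than two fields; exactly those inputs are excluded (B raises there as well).
def Pre_solution (tickets : List (List String)) : Prop := ∀ t ∈ tickets, 2 ≤ t.length
instance (tickets : List (List String)) : Decidable (Pre_solution tickets) := by
  unfold Pre_solution; infer_instance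

def pvWitness_solution : List (List String) := [["ICN", "AAA"], ["AAA", "ICN"]]

def Spec_solution (tickets : List (List String)) (out : List String) : Prop := out = solution_alt tickets
instance (tickets : List (List String)) (out : List String) : Decidable (Spec_solution tickets out) := by unfold Spec_solution; infer_instance

-- ===== CLAIM (what is proved, stated in full; the proofs are below) =====
def Claim_equal_solution : Prop := ∀ (tickets : List (List String)), Dom_solution tickets → Pre_solution tickets → Spec_solution tickets (solution tickets)

-- ===== LEMMAS AND PROOFS =====

-- Proof-side reference algorithm: count-based sorted backtracking (first success over the
-- sorted distinct destinations, decrementing/restoring a counter).  A is proved equal to it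
-- below (pvMain/solution_eq_ref), and B's min-over-enumeration is proved equal to it too
-- (pvMainMin/alt_eq_ref).
def pvCntB (tickets : List (List String)) : PySem.Dict (String × String) Int :=
  PySem.Dict.counter (tickets.map
    (fun t => (PySem.List.pyGetD t 0 "", PySem.List.pyGetD t 1 "")))

def pvAdjB (cnt : PySem.Dict (String × String) Int) : PySem.Dict String (List String) :=
  let adj := cnt.keys.foldl (fun d p => d.modify p.1 [] (· ++ [p.2])) PySem.Dict.empty
  adj.keys.foldl (fun d s => d.modify s [] (fun l => PySem.List.sorted l (fun x => x) false)) adj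

mutual
def pvGoB (adj : PySem.Dict String (List String)) (n : Nat) :
    Nat → String → Nat → List String → PySem.Dict (String × String) Int →
      (List String × PySem.Dict (String × String) Int)
  | fuel, node, used, path, cnt =>
    if used = n then (path, cnt)
    else
      match fuel with
      | 0 => ([], cnt)
      | fuel + 1 => pvGoLoopB adj n fuel node used path cnt (adj.getD node [])
  termination_by fuel _ _ _ _ => (fuel, 0)

def pvGoLoopB (adj : PySem.Dict String (List String)) (n : Nat) :
    Nat → String → Nat → List String → PySem.Dict (String × String) Int → List String →
      (List String × PySem.Dict (String × String) Int)
  | _fuel, _node, _used, _path, cnt, [] => ([], cnt)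
  | fuel, node, used, path, cnt, e :: es =>
    let c := cnt.getD (node, e) 0
    if c ≠ 0 then
      let r := pvGoB adj n fuel e (used + 1) (path ++ [e]) (cnt.insert (node, e) (c - 1))
      if r.1 ≠ [] then r
      else pvGoLoopB adj n fuel node used path (r.2.insert (node, e) c) es
    else pvGoLoopB adj n fuel node used path cnt es
  termination_by fuel _ _ _ _ es => (fuel, es.length + 1)
end

def pvAltRef (tickets : List (List String)) : List String :=
  let cnt := pvCntB tickets
  (pvGoB (pvAdjB cnt) tickets.length (tickets.length + 1) "ICN" 0 ["ICN"] cnt).1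

def srcAt (ts : List (List String)) (k : Nat) : String := PySem.List.pyGetD (ts.getD k []) 0 ""
def dstAt (ts : List (List String)) (k : Nat) : String := PySem.List.pyGetD (ts.getD k []) 1 ""
def infoGet (ts : List (List String)) (s : String) : List Nat :=
  (List.range ts.length).filter (fun k => srcAt ts k == s)


def udests (ts : List (List String)) (ks : List Nat) (v : List Bool) : List String :=
  (ks.filter (fun k => !v.getD k false)).map (dstAt ts)

def expandS (cnt : PySem.Dict (String × String) Int) (s : String) (es : List String) : List String :=
  es.flatMap (fun e => List.replicate (cnt.getD (s, e) 0).toNat e)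

theorem pvCountP_range {α : Type} (l : List α) (q : α → Bool) (d : α) :
    l.countP q = (List.range l.length).countP (fun k => q (l.getD k d)) := by
  have hmap : (List.range l.length).map (fun k => l.getD k d) = l := by
    apply List.ext_getElem (by simp)
    intro i h1 h2
    simp [List.getElem?_eq_getElem h2]
  conv_lhs => rw [← hmap]
  rw [List.countP_map]
  rfl

theorem pvGetD_set_ne (v : List Bool) (k k' : Nat) (h : k ≠ k') (b : Bool) :
    (v.set k b)[k']?.getD false = v[k']?.getD false := by
  rw [List.getElem?_set_ne h]

theorem pvUdests_set_not_mem (ts : List (List String)) (ks : List Nat) (v : List Bool)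
    (k : Nat) (b : Bool) (hk : k ∉ ks) : udests ts ks (v.set k b) = udests ts ks v := by
  induction ks with
  | nil => rfl
  | cons a t ih =>
    have h1 : k ≠ a := fun h => hk (h ▸ List.mem_cons_self)
    have h2 : k ∉ t := fun h => hk (List.mem_cons_of_mem _ h)
    simp only [udests, List.filter_cons, List.getD, pvGetD_set_ne v k a h1 b]
    split
    · simp only [List.map_cons]
      exact congrArg _ (by simpa [udests, List.getD] using ih h2)
    · simpa [udests, List.getD] using ih h2

theorem pvUdests_count_set (ts : List (List String)) (ks : List Nat) (v : List Bool)
    (k : Nat) (hnd : ks.Nodup) (hk : k ∈ ks) (hu : v.getD k false = false)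
    (hkl : k < v.length) (d' : String) :
    (udests ts ks v).count d'
      = (udests ts ks (v.set k true)).count d' + (if dstAt ts k = d' then 1 else 0) := by
  simp only [List.getD] at hu
  induction ks with
  | nil => simp at hk
  | cons a t ih =>
    rcases List.mem_cons.mp hk with rfl | hkt
    · have hknott : k ∉ t := (List.nodup_cons.mp hnd).1
      have hset : (v.set k true)[k]?.getD false = true := by
        simp [List.getElem?_set_self hkl]
      rw [show udests ts (k :: t) v = dstAt ts k :: udests ts t v from by
            simp [udests, List.filter_cons, List.getD, hu]]
      rw [show udests ts (k :: t) (v.set k true) = udests ts t (v.set k true) from by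
            simp [udests, List.filter_cons, List.getD, hset]]
      rw [pvUdests_set_not_mem ts t v k true hknott, List.count_cons]
      by_cases hd : dstAt ts k = d' <;> simp [hd]
    · have ha : k ≠ a := fun h => (List.nodup_cons.mp hnd).1 (h ▸ hkt)
      have ihx := ih (List.nodup_cons.mp hnd).2 hkt
      rcases Bool.eq_false_or_eq_true (v[a]?.getD false) with hva | hva
      · rw [show udests ts (a :: t) v = udests ts t v from by
              simp [udests, List.filter_cons, List.getD, hva]]
        rw [show udests ts (a :: t) (v.set k true) = udests ts t (v.set k true) from by
              simp [udests, List.filter_cons, List.getD, pvGetD_set_ne v k a ha true, hva]]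
        exact ihx
      · rw [show udests ts (a :: t) v = dstAt ts a :: udests ts t v from by
              simp [udests, List.filter_cons, List.getD, hva]]
        rw [show udests ts (a :: t) (v.set k true) = dstAt ts a :: udests ts t (v.set k true) from by
              simp [udests, List.filter_cons, List.getD, pvGetD_set_ne v k a ha true, hva]]
        rw [List.count_cons, List.count_cons]
        by_cases hd : dstAt ts k = d' <;> simp [hd] at ihx ⊢ <;> omega

theorem pvMem_expand (cnt : PySem.Dict (String × String) Int) (s : String) (es : List String)
    (x : String) (hx : x ∈ expandS cnt s es) : x ∈ es := by
  simp only [expandS, List.mem_flatMap] at hx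
  obtain ⟨e, he, hr⟩ := hx
  rw [List.eq_of_mem_replicate hr]
  exact he

theorem pvCount_expand (cnt : PySem.Dict (String × String) Int) (s : String) (es : List String)
    (hnd : es.Nodup) (d : String) :
    (expandS cnt s es).count d = if d ∈ es then (cnt.getD (s, d) 0).toNat else 0 := by
  induction es with
  | nil => simp [expandS]
  | cons e t ih =>
    have hnt := (List.nodup_cons.mp hnd).2
    simp only [expandS, List.flatMap_cons, List.count_append]
    rw [show (t.flatMap fun e => List.replicate (cnt.getD (s, e) 0).toNat e) = expandS cnt s t from rfl,
        ih hnt, List.count_replicate]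
    by_cases hde : d = e
    · subst hde
      have : d ∉ t := (List.nodup_cons.mp hnd).1
      simp [this]
    · simp [hde, List.mem_cons, Ne.symm hde, beq_iff_eq]

theorem pvPairwise_expand (cnt : PySem.Dict (String × String) Int) (s : String)
    (es : List String) (h : es.Pairwise (· < ·)) : (expandS cnt s es).Pairwise (· ≤ ·) := by
  induction es with
  | nil => simp [expandS]
  | cons e t ih =>
    rcases List.pairwise_cons.mp h with ⟨he, ht⟩
    simp only [expandS, List.flatMap_cons]
    apply List.pairwise_append.mpr
    refine ⟨?_, ih ht, ?_⟩
    · exact List.pairwise_replicate.mpr (Or.inr le_rfl)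
    · intro x hx y hy
      rw [List.eq_of_mem_replicate hx]
      exact le_of_lt (he y (pvMem_expand cnt s t y hy))

theorem pvDictInsertSelf {κ ν : Type} [BEq κ] [LawfulBEq κ] (d : PySem.Dict κ ν) (k : κ) (v : ν)
    (hnd : d.keys.Nodup) (h : d.get? k = some v) : d.insert k v = d := by
  apply PySem.Dict.ext
  rw [PySem.Dict.items_insert_of_contains _ _ (by rw [PySem.Dict.contains_eq_isSome_get?, h]; rfl)]
  have : ∀ p ∈ d.items, (if p.1 == k then (k, v) else p) = p := by
    intro p hp
    split
    · next hbeq =>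
      have hk1 : p.1 = k := by simpa using hbeq
      have := PySem.Dict.get?_of_mem_items d (by simpa using hp) hnd
      rw [hk1, h] at this
      obtain rfl : v = p.2 := by simpa using this
      simp [← hk1]
    · rfl
  rw [List.map_congr_left this]
  simp

theorem pvSetEqSelf (v : List Bool) (k : Nat) (h : v.getD k false = false) :
    v.set k false = v := by
  rcases Nat.lt_or_ge k v.length with hk | hk
  · rw [List.getD_eq_getElem _ _ hk] at h
    apply List.ext_getElem (by simp)
    intro i h1 h2
    rw [List.getElem_set]
    split <;> simp_all
  · exact List.set_eq_of_length_le hk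

theorem pvLoopB_zero (adj : PySem.Dict String (List String)) (n fuel : Nat) (node : String)
    (used : Nat) (path : List String) (cnt : PySem.Dict (String × String) Int)
    (es : List String) (h : ∀ e ∈ es, cnt.getD (node, e) 0 = 0) :
    pvGoLoopB adj n fuel node used path cnt es = ([], cnt) := by
  induction es with
  | nil => rw [pvGoLoopB]
  | cons e t ih =>
    rw [pvGoLoopB]
    simp only [h e List.mem_cons_self, ne_eq, not_true_eq_false, if_false]
    exact ih (fun e' he' => h e' (List.mem_cons_of_mem _ he'))


theorem pvInfoA_getD (ts : List (List String)) (s : String) :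
    (pvInfoA ts).getD s [] = (infoGet ts s).map (fun k : Nat => (k : Int)) := by
  unfold pvInfoA
  rw [PySem.List.enumerate_eq_map_pyRange (d := []), List.foldl_map]
  have hgen := PySem.Dict.getD_foldl_modify_append
    (l := (PySem.List.pyRange 0 (PySem.List.len ts) 1).map
      (fun j => (PySem.List.pyGetD (PySem.List.pyGetD ts j []) 0 "", j)))
    (d := PySem.Dict.empty) (c := s)
  rw [List.foldl_map] at hgen
  rw [hgen]
  simp only [PySem.Dict.getD_empty, List.nil_append, List.filter_map, List.map_map]
  rw [PySem.List.len_eq, PySem.List.pyRange_zero_natCast]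
  simp [List.filter_map, List.map_map, Function.comp_def, infoGet, srcAt]


theorem pvSortedStr_pairwise (l : List String) :
    (PySem.List.sorted l (fun x => x) false).Pairwise (· ≤ ·) :=
  PySem.List.sorted_pairwise l (fun x => x)

theorem pvSortedStr_perm (l : List String) :
    (PySem.List.sorted l (fun x => x) false).Perm l :=
  PySem.List.sorted_perm l (fun x => x) false


theorem pvFoldSort_getD (ks : List String) (d : PySem.Dict String (List String))
    (hnd : ks.Nodup) (s : String) :
    (ks.foldl (fun d s' => d.modify s' [] (fun l => PySem.List.sorted l (fun x => x) false)) d).getD s []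
      = if s ∈ ks then PySem.List.sorted (d.getD s []) (fun x => x) false else d.getD s [] := by
  induction ks generalizing d with
  | nil => simp
  | cons a t ih =>
    rw [List.foldl_cons, ih _ (List.nodup_cons.mp hnd).2]
    by_cases hsa : s = a
    · subst hsa
      have : s ∉ t := (List.nodup_cons.mp hnd).1
      simp [this, PySem.Dict.getD_modify_self]
    · have hne := PySem.Dict.getD_modify_of_ne d (k := a) (k' := s) []
        (fun l => PySem.List.sorted l (fun x => x) false) hsa
      simp [hsa, hne]


theorem pvAdjB_getD (tickets : List (List String)) (s : String) :
    (pvAdjB (pvCntB tickets)).getD s []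
      = if s ∈ ((pvCntB tickets).keys.map (·.1))
        then PySem.List.sorted (((pvCntB tickets).keys.filter (fun p => p.1 == s)).map (·.2)) (fun x => x) false
        else [] := by
  unfold pvAdjB
  have hkeys : ((pvCntB tickets).keys.foldl
      (fun d p => d.modify p.1 [] (· ++ [p.2])) PySem.Dict.empty).keys
      = PySem.Set.ofList ((pvCntB tickets).keys.map (·.1)) := by
    rw [PySem.Dict.keys_foldl_modify_key ((pvCntB tickets).keys)
      (fun p : String × String => p.1) ([] : List String)
      (fun _ p l => l ++ [p.2]) PySem.Dict.empty]
    simp [PySem.Set.update_nil_left]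
  have hnd : ((pvCntB tickets).keys.foldl
      (fun d p => d.modify p.1 [] (· ++ [p.2])) PySem.Dict.empty).keys.Nodup := by
    rw [hkeys]; exact PySem.Set.nodup_ofList _
  rw [pvFoldSort_getD _ _ hnd s, PySem.Dict.getD_foldl_modify_append, hkeys]
  simp only [PySem.Dict.getD_empty, List.nil_append]
  by_cases hs : s ∈ (pvCntB tickets).keys.map (·.1)
  · simp [hs, PySem.Set.mem_ofList]
  · have hfil : (pvCntB tickets).keys.filter (fun p => p.1 == s) = [] := by
      rw [List.filter_eq_nil_iff]
      intro p hp hps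
      exact hs (List.mem_map.mpr ⟨p, hp, by simpa using hps⟩)
    simp [hs, PySem.Set.mem_ofList, hfil]


theorem pvAdjB_mem (tickets : List (List String)) (s d : String) :
    d ∈ (pvAdjB (pvCntB tickets)).getD s [] ↔ (s, d) ∈ (pvCntB tickets).keys := by
  rw [pvAdjB_getD]
  split
  · rw [PySem.List.mem_sorted]
    constructor
    · intro h
      obtain ⟨p, hp, hp2⟩ := List.mem_map.mp h
      have := List.mem_filter.mp hp
      have h1 : p.1 = s := by simpa using this.2
      have : p = (s, d) := by rw [Prod.ext_iff]; exact ⟨h1, hp2⟩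
      exact this ▸ this.symm ▸ (List.mem_filter.mp hp).1
    · intro h
      exact List.mem_map.mpr ⟨(s, d), List.mem_filter.mpr ⟨h, by simp⟩, rfl⟩
  · next hs =>
    simp only [List.not_mem_nil, false_iff]
    intro h
    exact hs (List.mem_map.mpr ⟨(s, d), h, rfl⟩)


theorem pvAdjB_pairwise (tickets : List (List String)) (s : String) :
    ((pvAdjB (pvCntB tickets)).getD s []).Pairwise (· < ·) := by
  rw [pvAdjB_getD]
  split
  · have hle := pvSortedStr_pairwise (((pvCntB tickets).keys.filter (fun p => p.1 == s)).map (·.2))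
    have hbase : (((pvCntB tickets).keys.filter (fun p => p.1 == s)).map (·.2)).Nodup := by
      apply List.Nodup.map_on
      · intro x hx y hy hxy
        have hx1 : x.1 = s := by simpa using (List.mem_filter.mp hx).2
        have hy1 : y.1 = s := by simpa using (List.mem_filter.mp hy).2
        rw [Prod.ext_iff]
        exact ⟨hx1.trans hy1.symm, hxy⟩
      · exact (PySem.Dict.nodup_keys_counter _).filter _
    have hnd : (PySem.List.sorted (((pvCntB tickets).keys.filter (fun p => p.1 == s)).map (·.2))
        (fun x => x) false).Nodup := ((pvSortedStr_perm _).nodup_iff).mpr hbase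
    exact (hle.and hnd).imp (fun h => lt_of_le_of_ne h.1 h.2)
  · simp


theorem pvLexStep (u w : List String) (hu : 2 ≤ u.length) (hw : 2 ≤ w.length)
    (hle : u ≤ w) (h0 : PySem.List.pyGetD u 0 "" = PySem.List.pyGetD w 0 "") :
    PySem.List.pyGetD u 1 "" ≤ PySem.List.pyGetD w 1 "" := by
  match u, w with
  | a :: b :: ru, c :: e :: rw =>
    have h0' : a = c := by simpa [PySem.List.pyGetD_zero_cons] using h0
    subst h0'
    have h1 : PySem.List.pyGetD (a :: b :: ru) 1 "" = b := by
      simp [pysem]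
    have h2 : PySem.List.pyGetD (a :: e :: rw) 1 "" = e := by
      simp [pysem]
    rw [h1, h2]
    rcases lt_or_eq_of_le hle with hlt | heq
    · rcases List.cons_lt_cons_iff.mp hlt with h3 | ⟨-, h4⟩
      · exact absurd h3 (lt_irrefl a)
      · rcases List.cons_lt_cons_iff.mp h4 with h5 | ⟨h6, -⟩
        · exact le_of_lt h5
        · exact le_of_eq h6
    · injection heq with _ h7
      injection h7 with h8 _
      exact le_of_eq h8


theorem pvDsts_pairwise (ts : List (List String)) (hlen : ∀ t ∈ ts, 2 ≤ t.length)
    (hsort : ts.Pairwise (· ≤ ·)) (s : String) :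
    ((infoGet ts s).map (dstAt ts)).Pairwise (· ≤ ·) := by
  rw [List.pairwise_map]
  have hpf : (infoGet ts s).Pairwise (· < ·) := List.pairwise_lt_range.filter _
  apply hpf.imp_of_mem
  intro k1 k2 h1 h2 hk12
  have hm1 := List.mem_filter.mp h1
  have hm2 := List.mem_filter.mp h2
  have hk1n : k1 < ts.length := List.mem_range.mp hm1.1
  have hk2n : k2 < ts.length := List.mem_range.mp hm2.1
  have hsrc : srcAt ts k1 = srcAt ts k2 := by
    have e1 : srcAt ts k1 = s := by simpa using hm1.2
    have e2 : srcAt ts k2 = s := by simpa using hm2.2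
    rw [e1, e2]
  have hts : ts[k1] ≤ ts[k2] := List.pairwise_iff_getElem.mp hsort k1 k2 hk1n hk2n hk12
  have hg1 : ts.getD k1 [] = ts[k1] := List.getD_eq_getElem ts [] hk1n
  have hg2 : ts.getD k2 [] = ts[k2] := List.getD_eq_getElem ts [] hk2n
  unfold dstAt
  rw [hg1, hg2]
  apply pvLexStep _ _ (hlen _ (List.getElem_mem hk1n)) (hlen _ (List.getElem_mem hk2n)) hts
  unfold srcAt at hsrc
  rw [hg1, hg2] at hsrc
  exact hsrc

def GOOD (ts : List (List String)) (K : List (String × String))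
    (v : List Bool) (cnt : PySem.Dict (String × String) Int) : Prop :=
  v.length = ts.length ∧ cnt.keys.Nodup ∧ (∀ p : String × String, 0 ≤ cnt.getD p 0) ∧
  (∀ s d, (udests ts (infoGet ts s) v).count d = (cnt.getD (s, d) 0).toNat) ∧
  (∀ s d, (s, d) ∉ K → cnt.getD (s, d) 0 = 0)


theorem pvGood_pos (ts : List (List String)) (K : List (String × String))
    (v : List Bool) (cnt : PySem.Dict (String × String) Int) (k : Nat) (s : String)
    (hgood : GOOD ts K v cnt) (hk : k ∈ infoGet ts s) (hu : v.getD k false = false) :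
    0 < cnt.getD (s, dstAt ts k) 0 := by
  obtain ⟨hv, hknd, hpos, hcnt, hK⟩ := hgood
  have hmem : dstAt ts k ∈ udests ts (infoGet ts s) v :=
    List.mem_map.mpr ⟨k, List.mem_filter.mpr ⟨hk, by rw [hu]; rfl⟩, rfl⟩
  have hc := List.count_pos_iff.mpr hmem
  rw [hcnt s (dstAt ts k)] at hc
  have := hpos (s, dstAt ts k)
  omega


theorem pvGood_top_rel (ts : List (List String)) (K : List (String × String))
    (adj : PySem.Dict String (List String)) (v : List Bool)
    (cnt : PySem.Dict (String × String) Int)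
    (hdsts : ∀ s, ((infoGet ts s).map (dstAt ts)).Pairwise (· ≤ ·))
    (hadjP : ∀ s, (adj.getD s []).Pairwise (· < ·))
    (hadjM : ∀ s d, d ∈ adj.getD s [] ↔ (s, d) ∈ K)
    (hgood : GOOD ts K v cnt) (s : String) :
    udests ts (infoGet ts s) v = expandS cnt s (adj.getD s []) := by
  obtain ⟨hv, hknd, hpos, hcnt, hK⟩ := hgood
  have hadjnd : (adj.getD s []).Nodup := (hadjP s).imp (fun h => ne_of_lt h)
  apply List.Perm.eq_of_pairwise (le := (· ≤ ·))
  · intro a b _ _ h1 h2; exact le_antisymm h1 h2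
  · exact List.Pairwise.sublist ((List.filter_sublist).map (dstAt ts)) (hdsts s)
  · exact pvPairwise_expand cnt s _ (hadjP s)
  · apply List.perm_iff_count.mpr
    intro d
    rw [hcnt s d, pvCount_expand cnt s _ hadjnd d]
    by_cases hmem : d ∈ adj.getD s []
    · simp [hmem]
    · have : (s, d) ∉ K := fun h => hmem ((hadjM s d).mpr h)
      simp [hmem, hK s d this]


theorem pvGood_update (ts : List (List String)) (K : List (String × String))
    (v : List Bool) (cnt : PySem.Dict (String × String) Int) (k : Nat) (s : String)
    (hgood : GOOD ts K v cnt) (hk : k ∈ infoGet ts s) (hu : v.getD k false = false)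
    (hc : 0 < cnt.getD (s, dstAt ts k) 0) :
    GOOD ts K (v.set k true) (cnt.insert (s, dstAt ts k) (cnt.getD (s, dstAt ts k) 0 - 1)) := by
  obtain ⟨hv, hknd, hpos, hcnt, hK⟩ := hgood
  have hkn : k < ts.length := List.mem_range.mp (List.mem_filter.mp hk).1
  have hsrck : srcAt ts k = s := by simpa using (List.mem_filter.mp hk).2
  have hkv : k < v.length := by omega
  refine ⟨by simp [hv], PySem.Dict.nodup_keys_insert _ _ _ hknd, ?_, ?_, ?_⟩
  · intro p
    rw [PySem.Dict.getD_insert]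
    split
    · omega
    · exact hpos p
  · intro s' d'
    rw [PySem.Dict.getD_insert]
    by_cases hs' : s' = s
    · subst hs'
      have hcs := pvUdests_count_set ts (infoGet ts s') v k
        (List.nodup_range.filter _) hk hu hkv d'
      by_cases hd' : d' = dstAt ts k
      · rw [hd'] at hcs ⊢
        rw [if_pos rfl]
        rw [hcnt s' (dstAt ts k), if_pos rfl] at hcs
        omega
      · rw [if_neg (fun h => hd' (congrArg Prod.snd h))]
        rw [hcnt s' d', if_neg (fun h => hd' h.symm)] at hcs
        omega
    · have hknot : k ∉ infoGet ts s' := by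
        intro hmem
        have h2 : srcAt ts k = s' := by simpa using (List.mem_filter.mp hmem).2
        exact hs' (h2.symm.trans hsrck)
      rw [pvUdests_set_not_mem ts _ v k true hknot]
      rw [if_neg (fun h => hs' (congrArg Prod.fst h))]
      exact hcnt s' d'
  · intro s' d' hmem
    rw [PySem.Dict.getD_insert]
    split
    · next heq =>
      exfalso
      rw [heq] at hmem
      exact absurd (hK _ _ hmem) (by omega)
    · exact hK s' d' hmem


theorem pvReplicateGetD (n k : Nat) : (List.replicate n false).getD k false = false := by
  rcases Nat.lt_or_ge k n with h | h
  · rw [List.getD_eq_getElem _ _ (by simpa using h)]; simp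
  · exact List.getD_eq_default _ _ (by simpa using h)


theorem pvGood_init (tickets : List (List String)) :
    GOOD (PySem.List.sorted tickets (fun t => t) false) (pvCntB tickets).keys
      (List.replicate (PySem.List.sorted tickets (fun t => t) false).length false)
      (pvCntB tickets) := by
  set ts := PySem.List.sorted tickets (fun t => t) false with hts
  have hperm : ts.Perm tickets := PySem.List.sorted_perm tickets (fun t => t) false
  refine ⟨by simp, PySem.Dict.nodup_keys_counter _, ?_, ?_, ?_⟩
  · intro p
    rw [show pvCntB tickets = PySem.Dict.counter (tickets.map
      (fun t => (PySem.List.pyGetD t 0 "", PySem.List.pyGetD t 1 ""))) from rfl,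
      PySem.Dict.getD_counter]
    positivity
  · intro s d
    have hfil : udests ts (infoGet ts s) (List.replicate ts.length false)
        = (infoGet ts s).map (dstAt ts) := by
      unfold udests
      rw [List.filter_eq_self.mpr (fun k _ => by rw [pvReplicateGetD]; rfl)]
    rw [hfil]
    rw [show pvCntB tickets = PySem.Dict.counter (tickets.map
      (fun t => (PySem.List.pyGetD t 0 "", PySem.List.pyGetD t 1 ""))) from rfl,
      PySem.Dict.getD_counter, Int.toNat_natCast]
    rw [List.count_eq_countP, List.count_eq_countP, List.countP_map, List.countP_map]
    unfold infoGet
    rw [List.countP_filter, ← hperm.countP_eq, pvCountP_range ts _ []]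
    apply List.countP_congr
    intro k hk
    simp only [Function.comp_def]
    by_cases h1 : PySem.List.pyGetD (ts.getD k []) 0 "" = s <;>
      by_cases h2 : PySem.List.pyGetD (ts.getD k []) 1 "" = d <;>
        simp [h1, h2, Prod.ext_iff, srcAt, dstAt, and_comm]
  · intro s d hmem
    rw [show pvCntB tickets = PySem.Dict.counter (tickets.map
      (fun t => (PySem.List.pyGetD t 0 "", PySem.List.pyGetD t 1 ""))) from rfl,
      PySem.Dict.getD_counter]
    norm_num
    rw [List.count_eq_zero]
    intro hc
    apply hmem
    rw [show (pvCntB tickets).keys = PySem.Set.ofList (tickets.map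
      (fun t => (PySem.List.pyGetD t 0 "", PySem.List.pyGetD t 1 ""))) from
      PySem.Dict.keys_counter _]
    exact (PySem.Set.mem_ofList _ _).mpr hc


def MAINC (ts : List (List String)) (info : PySem.Dict String (List Int))
    (adj : PySem.Dict String (List String)) (n fuel : Nat) (arr : List String)
    (v : List Bool) (cnt : PySem.Dict (String × String) Int) : Prop :=
  (pvDfsA ts info n fuel arr v).1
      = (pvGoB adj n fuel (PySem.List.pyGetD arr (-1) "") (arr.length - 1) arr cnt).1 ∧
  ((pvDfsA ts info n fuel arr v).1 = [] → (pvDfsA ts info n fuel arr v).2 = v) ∧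
  ((pvGoB adj n fuel (PySem.List.pyGetD arr (-1) "") (arr.length - 1) arr cnt).1 = [] →
    (pvGoB adj n fuel (PySem.List.pyGetD arr (-1) "") (arr.length - 1) arr cnt).2 = cnt)

def LOOPC (ts : List (List String)) (info : PySem.Dict String (List Int))
    (adj : PySem.Dict String (List String)) (n fuel : Nat) (arr : List String)
    (v : List Bool) (cnt : PySem.Dict (String × String) Int)
    (is : List Nat) (es : List String) : Prop :=
  (pvLoopA ts info n fuel arr v (is.map (fun k : Nat => (k : Int)))).1
      = (pvGoLoopB adj n fuel (PySem.List.pyGetD arr (-1) "") (arr.length - 1) arr cnt es).1 ∧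
  ((pvLoopA ts info n fuel arr v (is.map (fun k : Nat => (k : Int)))).1 = [] →
    (pvLoopA ts info n fuel arr v (is.map (fun k : Nat => (k : Int)))).2 = v) ∧
  ((pvGoLoopB adj n fuel (PySem.List.pyGetD arr (-1) "") (arr.length - 1) arr cnt es).1 = [] →
    (pvGoLoopB adj n fuel (PySem.List.pyGetD arr (-1) "") (arr.length - 1) arr cnt es).2 = cnt)


theorem pvUnified (ts : List (List String)) (info : PySem.Dict String (List Int))
    (adj : PySem.Dict String (List String)) (K : List (String × String)) (n : Nat)
    (hn : n = ts.length)
    (hdsts : ∀ s, ((infoGet ts s).map (dstAt ts)).Pairwise (· ≤ ·))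
    (hinfo : ∀ s, info.getD s [] = (infoGet ts s).map (fun k : Nat => (k : Int)))
    (hadjP : ∀ s, (adj.getD s []).Pairwise (· < ·))
    (hadjM : ∀ s d, d ∈ adj.getD s [] ↔ (s, d) ∈ K)
    (fuel : Nat)
    (ihmain : ∀ arr v cnt, arr ≠ [] → GOOD ts K v cnt → MAINC ts info adj n fuel arr v cnt) :
    ∀ (T : Nat) (is : List Nat) (es : List String) (j : Nat) (d : String)
      (arr : List String) (v : List Bool) (cnt : PySem.Dict (String × String) Int),
      is.length + es.length ≤ T → arr ≠ [] → GOOD ts K v cnt →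
      (∀ k ∈ is, k ∈ infoGet ts (PySem.List.pyGetD arr (-1) "")) →
      udests ts is v = List.replicate j d ++ expandS cnt (PySem.List.pyGetD arr (-1) "") es →
      (j ≠ 0 → (pvGoB adj n fuel d arr.length (arr ++ [d])
          (cnt.insert (PySem.List.pyGetD arr (-1) "", d)
            (cnt.getD (PySem.List.pyGetD arr (-1) "", d) 0 - 1))).1 = []) →
      LOOPC ts info adj n fuel arr v cnt is es := by
  intro T
  induction T with
  | zero =>
    intro is es j d arr v cnt hT harr hg his hrel hj
    have his0 : is = [] := List.eq_nil_of_length_eq_zero (by omega)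
    have hes0 : es = [] := List.eq_nil_of_length_eq_zero (by omega)
    subst his0; subst hes0
    unfold LOOPC
    simp only [List.map_nil]
    rw [pvLoopA, pvGoLoopB]
    exact ⟨rfl, fun _ => rfl, fun _ => rfl⟩
  | succ T ihT =>
    intro is es j d arr v cnt hT harr hg his hrel hj
    cases is with
    | nil =>
      have hrel' : List.replicate j d ++ expandS cnt (PySem.List.pyGetD arr (-1) "") es = [] := by
        rw [← hrel]; rfl
      rcases List.append_eq_nil_iff.mp hrel' with ⟨hrep, hexp⟩
      have hz : ∀ e ∈ es, cnt.getD (PySem.List.pyGetD arr (-1) "", e) 0 = 0 := by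
        intro e he
        have := List.flatMap_eq_nil_iff.mp hexp _ he
        have h0 : (cnt.getD (PySem.List.pyGetD arr (-1) "", e) 0).toNat = 0 := by
          by_contra hne
          exact absurd this (by simp [List.replicate_eq_nil_iff, hne])
        have := hg.2.2.1 (PySem.List.pyGetD arr (-1) "", e)
        omega
      unfold LOOPC
      simp only [List.map_nil]
      rw [pvLoopA, pvLoopB_zero adj n fuel _ _ arr cnt es hz]
      exact ⟨rfl, fun _ => rfl, fun _ => rfl⟩
    | cons i rest =>
      have hiI := his i List.mem_cons_self
      have hrestI : ∀ k ∈ rest, k ∈ infoGet ts (PySem.List.pyGetD arr (-1) "") :=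
        fun k hk => his k (List.mem_cons_of_mem _ hk)
      have hkn : i < ts.length := List.mem_range.mp (List.mem_filter.mp hiI).1
      have hsrci : srcAt ts i = (PySem.List.pyGetD arr (-1) "") := by
        simpa using (List.mem_filter.mp hiI).2
      have hvlen : v.length = ts.length := hg.1
      have hgetv : PySem.List.pyGetD v (↑i : Int) false = v[i]?.getD false := by
        simp [pysem, List.getD]
      rcases Bool.eq_false_or_eq_true (v[i]?.getD false) with hvis | hvis
      · -- already visited: A skips i
        have hA : pvLoopA ts info n fuel arr v ((i :: rest).map (fun k : Nat => (k : Int)))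
            = pvLoopA ts info n fuel arr v (rest.map (fun k : Nat => (k : Int))) := by
          rw [List.map_cons, pvLoopA]
          simp only [hgetv, hvis, if_true]
        have hrel'' : udests ts rest v
            = List.replicate j d ++ expandS cnt (PySem.List.pyGetD arr (-1) "") es := by
          rw [← hrel]
          unfold udests
          rw [List.filter_cons]
          simp [hvis]
        have := ihT rest es j d arr v cnt (by simp at hT ⊢; omega) harr hg hrestI hrel'' hj
        unfold LOOPC at this ⊢
        rw [hA]
        exact this
      · -- unvisited: A tries ticket i with destination dstAt ts i
        have hudcons : udests ts (i :: rest) v = dstAt ts i :: udests ts rest v := by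
          unfold udests
          rw [List.filter_cons]
          simp [List.getD, hvis]
        rw [hudcons] at hrel
        have hdes : PySem.List.pyGetD (PySem.List.pyGetD ts (↑i : Int) []) 1 "" = dstAt ts i := by
          rw [PySem.List.pyGetD_natCast]; rfl
        have hsetv : PySem.List.pySetD v (↑i : Int) true = v.set i true := by
          simp [pysem]
        have huD : v.getD i false = false := hvis
        have hAunf : pvLoopA ts info n fuel arr v ((i :: rest).map (fun k : Nat => (k : Int)))
            = (if (pvDfsA ts info n fuel (arr ++ [dstAt ts i]) (v.set i true)).1 ≠ [] then
                 pvDfsA ts info n fuel (arr ++ [dstAt ts i]) (v.set i true)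
               else pvLoopA ts info n fuel arr
                 (PySem.List.pySetD (pvDfsA ts info n fuel (arr ++ [dstAt ts i]) (v.set i true)).2 (↑i : Int) false)
                 (rest.map (fun k : Nat => (k : Int)))) := by
          rw [List.map_cons, pvLoopA]
          simp only [hgetv, hvis, Bool.false_eq_true, if_false, hdes, hsetv]
        rcases Nat.eq_zero_or_pos j with hj0 | hjpos
        · subst hj0
          rw [List.replicate_zero, List.nil_append] at hrel
          cases es with
          | nil => simp [expandS] at hrel
          | cons e es' =>
            by_cases hc0 : cnt.getD (PySem.List.pyGetD arr (-1) "", e) 0 = 0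
            · -- B skips a zero-count destination
              have hBskip : pvGoLoopB adj n fuel (PySem.List.pyGetD arr (-1) "")
                    (arr.length - 1) arr cnt (e :: es')
                  = pvGoLoopB adj n fuel (PySem.List.pyGetD arr (-1) "")
                    (arr.length - 1) arr cnt es' := by
                rw [pvGoLoopB]
                simp [hc0]
              have hexp : expandS cnt (PySem.List.pyGetD arr (-1) "") (e :: es')
                  = expandS cnt (PySem.List.pyGetD arr (-1) "") es' := by
                unfold expandS
                rw [List.flatMap_cons]
                simp [hc0]
              rw [hexp] at hrel
              have := ihT (i :: rest) es' 0 d arr v cnt (by simp at hT ⊢; omega) harr hg his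
                (by rw [hudcons, List.replicate_zero, List.nil_append]; exact hrel)
                (by simp)
              unfold LOOPC at this ⊢
              rw [hBskip]
              exact this
            · -- positive head: the next distinct destination is e
              have hcpos : 0 < cnt.getD (PySem.List.pyGetD arr (-1) "", e) 0 := by
                have := hg.2.2.1 (PySem.List.pyGetD arr (-1) "", e)
                omega
              have hexpc : expandS cnt (PySem.List.pyGetD arr (-1) "") (e :: es')
                  = e :: (List.replicate ((cnt.getD (PySem.List.pyGetD arr (-1) "", e) 0).toNat - 1) e
                      ++ expandS cnt (PySem.List.pyGetD arr (-1) "") es') := by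
                unfold expandS
                rw [List.flatMap_cons,
                  show (cnt.getD (PySem.List.pyGetD arr (-1) "", e) 0).toNat
                    = ((cnt.getD (PySem.List.pyGetD arr (-1) "", e) 0).toNat - 1) + 1 by omega,
                  List.replicate_succ, List.cons_append]
                simp
              rw [hexpc] at hrel
              have hd : dstAt ts i = e := (List.cons.injEq .. ▸ hrel).1
              have htl : udests ts rest v
                  = List.replicate ((cnt.getD (PySem.List.pyGetD arr (-1) "", e) 0).toNat - 1) e
                    ++ expandS cnt (PySem.List.pyGetD arr (-1) "") es' :=
                (List.cons.injEq .. ▸ hrel).2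
              rw [hd] at hAunf
              have hgood' : GOOD ts K (v.set i true)
                  (cnt.insert (PySem.List.pyGetD arr (-1) "", e)
                    (cnt.getD (PySem.List.pyGetD arr (-1) "", e) 0 - 1)) := by
                have := pvGood_update ts K v cnt i _ hg hiI huD (hd ▸ hcpos)
                rwa [hd] at this
              have main := ihmain (arr ++ [e]) (v.set i true) _ (by simp) hgood'
              unfold MAINC at main
              rw [PySem.List.pyGetD_neg_one_append_singleton] at main
              simp only [List.length_append, List.length_singleton, Nat.add_sub_cancel] at main
              have hlen1 : arr.length - 1 + 1 = arr.length := by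
                cases arr with
                | nil => exact absurd rfl harr
                | cons a t => simp
              have hBunf : pvGoLoopB adj n fuel (PySem.List.pyGetD arr (-1) "")
                    (arr.length - 1) arr cnt (e :: es')
                  = (if (pvGoB adj n fuel e arr.length (arr ++ [e])
                        (cnt.insert (PySem.List.pyGetD arr (-1) "", e)
                          (cnt.getD (PySem.List.pyGetD arr (-1) "", e) 0 - 1))).1 ≠ [] then
                      pvGoB adj n fuel e arr.length (arr ++ [e])
                        (cnt.insert (PySem.List.pyGetD arr (-1) "", e)
                          (cnt.getD (PySem.List.pyGetD arr (-1) "", e) 0 - 1))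
                     else pvGoLoopB adj n fuel (PySem.List.pyGetD arr (-1) "")
                        (arr.length - 1) arr
                        ((pvGoB adj n fuel e arr.length (arr ++ [e])
                          (cnt.insert (PySem.List.pyGetD arr (-1) "", e)
                            (cnt.getD (PySem.List.pyGetD arr (-1) "", e) 0 - 1))).2.insert
                          (PySem.List.pyGetD arr (-1) "", e)
                          (cnt.getD (PySem.List.pyGetD arr (-1) "", e) 0)) es') := by
                rw [pvGoLoopB, if_pos hc0, hlen1]
              by_cases hrB : (pvGoB adj n fuel e arr.length (arr ++ [e])
                  (cnt.insert (PySem.List.pyGetD arr (-1) "", e)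
                    (cnt.getD (PySem.List.pyGetD arr (-1) "", e) 0 - 1))).1 = []
              · -- this branch fails on both sides; continue with the tails
                have hr1 : (pvDfsA ts info n fuel (arr ++ [e]) (v.set i true)).1 = [] := by
                  rw [main.1]; exact hrB
                have hr2 := main.2.1 hr1
                have hr3 := main.2.2 hrB
                have hA2 : pvLoopA ts info n fuel arr v ((i :: rest).map (fun k : Nat => (k : Int)))
                    = pvLoopA ts info n fuel arr v (rest.map (fun k : Nat => (k : Int))) := by
                  rw [hAunf, if_neg (by simp [hr1]), hr2]
                  simp only [PySem.List.pySetD_natCast]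
                  rw [List.set_set, pvSetEqSelf v i huD]
                have hget : cnt.get? (PySem.List.pyGetD arr (-1) "", e)
                    = some (cnt.getD (PySem.List.pyGetD arr (-1) "", e) 0) := by
                  rcases hq : cnt.get? (PySem.List.pyGetD arr (-1) "", e) with _ | x
                  · exfalso
                    apply hc0
                    rw [PySem.Dict.getD_eq_get?_getD, hq]
                    rfl
                  · rw [PySem.Dict.getD_eq_get?_getD, hq]
                    rfl
                have hB2 : pvGoLoopB adj n fuel (PySem.List.pyGetD arr (-1) "")
                      (arr.length - 1) arr cnt (e :: es')
                    = pvGoLoopB adj n fuel (PySem.List.pyGetD arr (-1) "")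
                      (arr.length - 1) arr cnt es' := by
                  rw [hBunf, if_neg (by simp [hrB]), hr3, PySem.Dict.insert_insert_self,
                    pvDictInsertSelf cnt _ _ hg.2.1 hget]
                have := ihT rest es'
                  ((cnt.getD (PySem.List.pyGetD arr (-1) "", e) 0).toNat - 1) e arr v cnt
                  (by simp at hT ⊢; omega) harr hg hrestI htl (fun _ => hrB)
                unfold LOOPC at this ⊢
                rw [hA2, hB2]
                exact this
              · -- success through e propagates on both sides
                have hr1 : (pvDfsA ts info n fuel (arr ++ [e]) (v.set i true)).1 ≠ [] := by
                  rw [main.1]; exact hrB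
                unfold LOOPC
                rw [hAunf, hBunf, if_pos hr1, if_pos hrB]
                exact ⟨main.1, fun h => absurd h hr1, fun h => absurd h hrB⟩
        · -- blocked mode: the head destination is d, whose first try already failed
          rw [show j = (j - 1) + 1 from (Nat.succ_pred_eq_of_pos hjpos).symm,
            List.replicate_succ, List.cons_append] at hrel
          have hd : dstAt ts i = d := (List.cons.injEq .. ▸ hrel).1
          have htl : udests ts rest v
              = List.replicate (j - 1) d ++ expandS cnt (PySem.List.pyGetD arr (-1) "") es :=
            (List.cons.injEq .. ▸ hrel).2
          rw [hd] at hAunf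
          have hc : 0 < cnt.getD (PySem.List.pyGetD arr (-1) "", d) 0 := by
            have := pvGood_pos ts K v cnt i _ hg hiI huD
            rwa [hd] at this
          have hgood' : GOOD ts K (v.set i true)
              (cnt.insert (PySem.List.pyGetD arr (-1) "", d)
                (cnt.getD (PySem.List.pyGetD arr (-1) "", d) 0 - 1)) := by
            have := pvGood_update ts K v cnt i _ hg hiI huD (hd ▸ hc)
            rwa [hd] at this
          have main := ihmain (arr ++ [d]) (v.set i true) _ (by simp) hgood'
          unfold MAINC at main
          rw [PySem.List.pyGetD_neg_one_append_singleton] at main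
          simp only [List.length_append, List.length_singleton, Nat.add_sub_cancel] at main
          have hr1 : (pvDfsA ts info n fuel (arr ++ [d]) (v.set i true)).1 = [] := by
            rw [main.1]
            exact hj (by omega)
          have hr2 := main.2.1 hr1
          have hA2 : pvLoopA ts info n fuel arr v ((i :: rest).map (fun k : Nat => (k : Int)))
              = pvLoopA ts info n fuel arr v (rest.map (fun k : Nat => (k : Int))) := by
            rw [hAunf, if_neg (by simp [hr1]), hr2]
            simp only [PySem.List.pySetD_natCast]
            rw [List.set_set, pvSetEqSelf v i huD]
          have := ihT rest es (j - 1) d arr v cnt (by simp at hT ⊢; omega) harr hg hrestI htl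
            (fun _ => hj (by omega))
          unfold LOOPC at this ⊢
          rw [hA2]
          exact this



theorem pvMain (ts : List (List String)) (info : PySem.Dict String (List Int))
    (adj : PySem.Dict String (List String)) (K : List (String × String)) (n : Nat)
    (hn : n = ts.length)
    (hdsts : ∀ s, ((infoGet ts s).map (dstAt ts)).Pairwise (· ≤ ·))
    (hinfo : ∀ s, info.getD s [] = (infoGet ts s).map (fun k : Nat => (k : Int)))
    (hadjP : ∀ s, (adj.getD s []).Pairwise (· < ·))
    (hadjM : ∀ s d, d ∈ adj.getD s [] ↔ (s, d) ∈ K) :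
    ∀ fuel arr v cnt, arr ≠ [] → GOOD ts K v cnt → MAINC ts info adj n fuel arr v cnt := by
  intro fuel
  induction fuel with
  | zero =>
    intro arr v cnt harr hg
    have hlen1 : 1 ≤ arr.length := List.length_pos_iff.mpr harr
    unfold MAINC
    rw [pvDfsA, pvGoB]
    by_cases hl : arr.length = n + 1
    · rw [if_pos hl, if_pos (by omega)]
      exact ⟨rfl, fun _ => rfl, fun _ => rfl⟩
    · rw [if_neg hl, if_neg (by omega)]
      exact ⟨rfl, fun _ => rfl, fun _ => rfl⟩
  | succ fuel ih =>
    intro arr v cnt harr hg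
    have hlen1 : 1 ≤ arr.length := List.length_pos_iff.mpr harr
    unfold MAINC
    rw [pvDfsA, pvGoB]
    by_cases hl : arr.length = n + 1
    · rw [if_pos hl, if_pos (by omega)]
      exact ⟨rfl, fun _ => rfl, fun _ => rfl⟩
    · rw [if_neg hl, if_neg (by omega)]
      have hrel : udests ts (infoGet ts (PySem.List.pyGetD arr (-1) "")) v
          = List.replicate 0 ""
            ++ expandS cnt (PySem.List.pyGetD arr (-1) "")
              (adj.getD (PySem.List.pyGetD arr (-1) "") []) := by
        rw [List.replicate_zero, List.nil_append]
        exact pvGood_top_rel ts K adj v cnt hdsts hadjP hadjM hg _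
      have := pvUnified ts info adj K n hn hdsts hinfo hadjP hadjM fuel ih
        ((infoGet ts (PySem.List.pyGetD arr (-1) "")).length
          + (adj.getD (PySem.List.pyGetD arr (-1) "") []).length)
        (infoGet ts (PySem.List.pyGetD arr (-1) ""))
        (adj.getD (PySem.List.pyGetD arr (-1) "") []) 0 "" arr v cnt
        le_rfl harr hg (fun k hk => hk) hrel (by simp)
      unfold LOOPC at this
      rw [← hinfo] at this
      exact this


theorem pvSorted_pairwise_le (tickets : List (List String)) :
    (PySem.List.sorted tickets (fun t => t) false).Pairwise (· ≤ ·) := by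
  have h : (fun (a b : List String) => a.decidableLT b)
      = (LinearOrder.toDecidableLT : DecidableLT (List String)) := by
    funext a b; exact Subsingleton.elim _ _
  rw [show (fun a b : List String => a.decidableLT b) = _ from h]
  exact PySem.List.sorted_pairwise tickets (fun t => t)


theorem solution_eq_ref (tickets : List (List String)) (hpre : ∀ t ∈ tickets, 2 ≤ t.length) :
    solution tickets = pvAltRef tickets := by
  unfold solution pvAltRef
  have hperm : (PySem.List.sorted tickets (fun t => t) false).Perm tickets :=
    PySem.List.sorted_perm tickets (fun t => t) false
  have hlen : ∀ t ∈ PySem.List.sorted tickets (fun t => t) false, 2 ≤ t.length :=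
    fun t ht => hpre t (hperm.subset ht)
  have main := pvMain (PySem.List.sorted tickets (fun t => t) false)
    (pvInfoA (PySem.List.sorted tickets (fun t => t) false))
    (pvAdjB (pvCntB tickets)) (pvCntB tickets).keys
    (PySem.List.sorted tickets (fun t => t) false).length rfl
    (pvDsts_pairwise _ hlen (pvSorted_pairwise_le tickets))
    (pvInfoA_getD _) (pvAdjB_pairwise tickets) (pvAdjB_mem tickets)
    ((PySem.List.sorted tickets (fun t => t) false).length + 1)
    ["ICN"] (List.replicate (PySem.List.sorted tickets (fun t => t) false).length false)
    (pvCntB tickets) (by simp) (pvGood_init tickets)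
  have h1 := main.1
  rw [show PySem.List.pyGetD ["ICN"] (-1) "" = "ICN" from rfl] at h1
  rw [show tickets.length = (PySem.List.sorted tickets (fun t => t) false).length from
    hperm.length_eq.symm]
  exact h1

-- ============ B-side: frontier expansion = min over full-route enumeration ============

-- All full suffix-trails of m more steps from v with remaining counter c, grouped as B's
-- successor generation groups them (one group per dict item).
def enumT : Nat → PySem.Dict (String × String) Int → String → List (List String)
  | 0, _, _ => [[]]
  | m + 1, c, v =>
    c.items.flatMap (fun it =>
      if it.1.1 = v ∧ 0 < it.2 then
        (enumT m (c.insert it.1 (it.2 - 1)) it.1.2).map (fun s => it.1.2 :: s)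
      else [])

theorem pvFoldConstStep {α β : Type} (f : α → α) :
    ∀ (l : List β) (x : α), l.foldl (fun a _ => f a) x = f^[l.length] x := by
  intro l
  induction l with
  | nil => intro x; rfl
  | cons b t ih =>
    intro x
    rw [List.foldl_cons, ih, List.length_cons, Function.iterate_succ_apply]

theorem pvPaths : ∀ (m : Nat) (states : List (List String × PySem.Dict (String × String) Int)),
    (pvStepB^[m] states).map (fun st => st.1)
      = states.flatMap (fun st =>
          (enumT m st.2 (PySem.List.pyGetD st.1 (-1) "")).map (fun s => st.1 ++ s)) := by
  intro m
  induction m with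
  | zero =>
    intro states
    simp only [Function.iterate_zero, id]
    induction states with
    | nil => rfl
    | cons s t ihs =>
      rw [List.map_cons, List.flatMap_cons, ihs,
        show enumT 0 s.2 (PySem.List.pyGetD s.1 (-1) "") = [[]] from rfl]
      simp
  | succ m ih =>
    intro states
    rw [Function.iterate_succ_apply, ih]
    show (pvStepB states).flatMap _ = _
    unfold pvStepB
    rw [List.flatMap_assoc]
    apply List.flatMap_congr
    intro st _
    show (st.2.items.flatMap _).flatMap _ = _
    rw [show enumT (m + 1) st.2 (PySem.List.pyGetD st.1 (-1) "")
        = st.2.items.flatMap (fun it =>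
            if it.1.1 = PySem.List.pyGetD st.1 (-1) "" ∧ 0 < it.2 then
              (enumT m (st.2.insert it.1 (it.2 - 1)) it.1.2).map (fun s => it.1.2 :: s)
            else []) from rfl]
    rw [List.flatMap_assoc, List.map_flatMap]
    apply List.flatMap_congr
    intro it _
    by_cases hg : it.1.1 = PySem.List.pyGetD st.1 (-1) "" ∧ 0 < it.2
    · rw [if_pos hg, if_pos hg]
      simp only [List.flatMap_cons, List.flatMap_nil, List.append_nil, List.map_map]
      rw [PySem.List.pyGetD_neg_one_append_singleton]
      apply List.map_congr_left
      intro s _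
      rw [List.append_assoc, List.singleton_append]
      rfl
    · rw [if_neg hg, if_neg hg]
      rfl

theorem pvMin?LO (l : List (List String)) :
    PySem.List.min? l (fun x => x)
      = @PySem.List.min? (List String) (List String) _ (@LinearOrder.toDecidableLT _ _) l (fun x => x) := by
  have h : (fun (a b : List String) => a.decidableLT b) = (LinearOrder.toDecidableLT : DecidableLT (List String)) := by
    funext a b; exact Subsingleton.elim _ _
  show @PySem.List.min? (List String) (List String) List.instLT (fun a b => a.decidableLT b) l (fun x => x) = _
  rw [h]

theorem pvMin_map_mono (f : List String → List String)
    (hf : ∀ a b : List String, f a < f b ↔ a < b) (l : List (List String)) :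
    PySem.List.min? (l.map f) (fun x => x) = (PySem.List.min? l (fun x => x)).map f := by
  have hfle : ∀ a b : List String, f a ≤ f b ↔ a ≤ b := by
    intro a b
    rw [← not_lt, ← not_lt, hf]
  cases hl : PySem.List.min? l (fun x => x) with
  | none =>
    have : l = [] := (PySem.List.min?_eq_none_iff l _).mp hl
    subst this
    simp [(PySem.List.min?_eq_none_iff ([] : List (List String)) _).mpr rfl]
  | some a =>
    have ha := PySem.List.min?_mem hl
    rw [pvMin?LO] at hl
    have hamin := PySem.List.min?_isMin hl
    cases hm : PySem.List.min? (l.map f) (fun x => x) with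
    | none =>
      have := (PySem.List.min?_eq_none_iff (l.map f) _).mp hm
      rw [List.map_eq_nil_iff] at this
      subst this
      simp at ha
    | some b =>
      have hb := PySem.List.min?_mem hm
      rw [pvMin?LO] at hm
      have hbmin := PySem.List.min?_isMin hm
      obtain ⟨y, hy, rfl⟩ := List.mem_map.mp hb
      have h1 : f a ≤ f y := (hfle a y).mpr (hamin y hy)
      have h2 : f y ≤ f a := hbmin (f a) (List.mem_map.mpr ⟨a, ha, rfl⟩)
      rw [Option.map_some]
      exact congrArg some (le_antisymm h2 h1)

theorem pvMin_congr_mem (l l' : List (List String))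
    (h : ∀ x, x ∈ l ↔ x ∈ l') :
    PySem.List.min? l (fun x => x) = PySem.List.min? l' (fun x => x) := by
  cases hl : PySem.List.min? l (fun x => x) with
  | none =>
    have h0 : l = [] := (PySem.List.min?_eq_none_iff l _).mp hl
    subst h0
    cases hl' : PySem.List.min? l' (fun x => x) with
    | none => rfl
    | some a =>
      have := PySem.List.min?_mem hl'
      rw [← h] at this
      simp at this
  | some a =>
    have ha := PySem.List.min?_mem hl
    rw [pvMin?LO] at hl
    have hamin := PySem.List.min?_isMin hl
    cases hl' : PySem.List.min? l' (fun x => x) with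
    | none =>
      have h0 : l' = [] := (PySem.List.min?_eq_none_iff l' _).mp hl'
      subst h0
      rw [h] at ha
      simp at ha
    | some b =>
      have hb := PySem.List.min?_mem hl'
      rw [pvMin?LO] at hl'
      have hbmin := PySem.List.min?_isMin hl'
      have h1 : a ≤ b := hamin b ((h b).mpr hb)
      have h2 : b ≤ a := hbmin a ((h a).mp ha)
      exact congrArg some (le_antisymm h1 h2)

theorem pvMin_append_left (l1 l2 : List (List String)) (a : List String)
    (h1 : PySem.List.min? l1 (fun x => x) = some a)
    (h2 : ∀ y ∈ l2, a ≤ y) :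
    PySem.List.min? (l1 ++ l2) (fun x => x) = some a := by
  have ha := PySem.List.min?_mem h1
  rw [pvMin?LO] at h1
  have hamin := PySem.List.min?_isMin h1
  cases hm : PySem.List.min? (l1 ++ l2) (fun x => x) with
  | none =>
    have := (PySem.List.min?_eq_none_iff (l1 ++ l2) _).mp hm
    rcases List.append_eq_nil_iff.mp this with ⟨e1, _⟩
    subst e1
    simp at ha
  | some b =>
    have hb := PySem.List.min?_mem hm
    rw [pvMin?LO] at hm
    have hbmin := PySem.List.min?_isMin hm
    have hba : b ≤ a := hbmin a (List.mem_append.mpr (Or.inl ha))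
    have hab : a ≤ b := by
      rcases List.mem_append.mp hb with hbl | hbr
      · exact hamin b hbl
      · exact h2 b hbr
    exact congrArg some (le_antisymm hba hab)

theorem pvConsLtIff (e : String) (a b : List String) : (e :: a) < (e :: b) ↔ a < b := by
  rw [List.cons_lt_cons_iff]
  simp [lt_irrefl]

theorem pvAppendLtIff (p : List String) : ∀ a b : List String, (p ++ a) < (p ++ b) ↔ a < b := by
  induction p with
  | nil => intro a b; rfl
  | cons c p' ih =>
    intro a b
    rw [List.cons_append, List.cons_append, List.cons_lt_cons_iff]
    simp [lt_irrefl, ih]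

-- The successor group of one distinct destination e, as B's enumeration produces it.
def pvGrp (m : Nat) (c : PySem.Dict (String × String) Int) (v e : String) : List (List String) :=
  if c.getD (v, e) 0 ≠ 0 then
    (enumT m (c.insert (v, e) (c.getD (v, e) 0 - 1)) e).map (fun s => e :: s)
  else []

theorem pvEnum_mem (m : Nat) (c : PySem.Dict (String × String) Int) (v : String)
    (x : List String) (hnd : c.keys.Nodup) (hpos : ∀ p, 0 ≤ c.getD p 0) :
    x ∈ enumT (m + 1) c v ↔ ∃ e, c.getD (v, e) 0 ≠ 0 ∧ x ∈ pvGrp m c v e := by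
  constructor
  · intro hx
    rw [show enumT (m + 1) c v = c.items.flatMap (fun it =>
        if it.1.1 = v ∧ 0 < it.2 then
          (enumT m (c.insert it.1 (it.2 - 1)) it.1.2).map (fun s => it.1.2 :: s)
        else []) from rfl] at hx
    obtain ⟨it, hit, hx2⟩ := List.mem_flatMap.mp hx
    by_cases hg : it.1.1 = v ∧ 0 < it.2
    · have hkey : it.1 = (v, it.1.2) := by
        rw [← hg.1]
      have hgetD : c.getD (v, it.1.2) 0 = it.2 := by
        rw [← hkey]
        exact PySem.Dict.getD_of_mem_items c hit hnd 0
      refine ⟨it.1.2, by omega, ?_⟩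
      unfold pvGrp
      rw [if_pos (by omega), hgetD]
      rw [if_pos hg] at hx2
      rw [← hkey]
      exact hx2
    · rw [if_neg hg] at hx2
      simp at hx2
  · rintro ⟨e, hne, hx⟩
    unfold pvGrp at hx
    rw [if_pos hne] at hx
    have hget : c.get? (v, e) = some (c.getD (v, e) 0) := by
      rcases hq : c.get? (v, e) with _ | k
      · exfalso
        apply hne
        rw [PySem.Dict.getD_eq_get?_getD, hq]
        rfl
      · rw [PySem.Dict.getD_eq_get?_getD, hq]
        rfl
    have hit : ((v, e), c.getD (v, e) 0) ∈ c.items := PySem.Dict.mem_items_of_get?_eq_some c hget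
    rw [show enumT (m + 1) c v = c.items.flatMap (fun it =>
        if it.1.1 = v ∧ 0 < it.2 then
          (enumT m (c.insert it.1 (it.2 - 1)) it.1.2).map (fun s => it.1.2 :: s)
        else []) from rfl]
    apply List.mem_flatMap.mpr
    refine ⟨((v, e), c.getD (v, e) 0), hit, ?_⟩
    rw [if_pos ⟨rfl, by have := hpos (v, e); omega⟩]
    exact hx

-- The central B-side theorem: the reference backtracking search returns path ++ (the
-- lexicographic minimum of the full enumeration), or [] when the enumeration is empty,
-- and restores the counter on failure.
theorem pvMainMin (adj : PySem.Dict String (List String)) (n : Nat)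
    (hadjP : ∀ s, (adj.getD s []).Pairwise (· < ·)) :
    ∀ m : Nat, ∀ (v : String) (used : Nat) (path : List String)
      (c : PySem.Dict (String × String) Int),
      used + m = n → path ≠ [] → c.keys.Nodup → (∀ p, 0 ≤ c.getD p 0) →
      (∀ s e, c.getD (s, e) 0 ≠ 0 → e ∈ adj.getD s []) →
      ((pvGoB adj n (m + 1) v used path c).1
          = (match PySem.List.min? (enumT m c v) (fun x => x) with
             | some s => path ++ s
             | none => []) ∧
       ((pvGoB adj n (m + 1) v used path c).1 = []
          → (pvGoB adj n (m + 1) v used path c).2 = c)) := by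
  intro m
  induction m with
  | zero =>
    intro v used path c hused hp hnd hpos hsupp
    have h0 : used = n := by omega
    rw [pvGoB, if_pos h0]
    have hmin : PySem.List.min? (enumT 0 c v) (fun x => x) = some [] := by
      cases hq : PySem.List.min? (enumT 0 c v) (fun x => x) with
      | none =>
        have := (PySem.List.min?_eq_none_iff _ _).mp hq
        rw [show enumT 0 c v = [[]] from rfl] at this
        simp at this
      | some a =>
        have ha := PySem.List.min?_mem hq
        rw [show enumT 0 c v = [[]] from rfl] at ha
        simp at ha
        rw [ha]
    rw [hmin]
    exact ⟨by simp, fun _ => rfl⟩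
  | succ m ih =>
    intro v used path c hused hp hnd hpos hsupp
    have hne : used ≠ n := by omega
    rw [pvGoB, if_neg hne]
    have loop : ∀ es : List String, es.Pairwise (· < ·) →
        ((pvGoLoopB adj n (m + 1) v used path c es).1
            = (match PySem.List.min? (es.flatMap (pvGrp m c v)) (fun x => x) with
               | some s => path ++ s
               | none => []) ∧
         ((pvGoLoopB adj n (m + 1) v used path c es).1 = []
            → (pvGoLoopB adj n (m + 1) v used path c es).2 = c)) := by
      intro es
      induction es with
      | nil =>
        intro _
        rw [pvGoLoopB, List.flatMap_nil,
          (PySem.List.min?_eq_none_iff ([] : List (List String)) _).mpr rfl]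
        exact ⟨rfl, fun _ => rfl⟩
      | cons e es' ihes =>
        intro hpw
        have hpw' := (List.pairwise_cons.mp hpw).2
        have hhd := (List.pairwise_cons.mp hpw).1
        by_cases hc0 : c.getD (v, e) 0 = 0
        · have hB : pvGoLoopB adj n (m + 1) v used path c (e :: es')
              = pvGoLoopB adj n (m + 1) v used path c es' := by
            rw [pvGoLoopB]
            simp [hc0]
          have hgrp : pvGrp m c v e = [] := by
            unfold pvGrp
            rw [if_neg (by omega)]
          rw [hB, List.flatMap_cons, hgrp, List.nil_append]
          exact ihes hpw'
        · have hkpos : 0 < c.getD (v, e) 0 := by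
            have := hpos (v, e)
            omega
          set c' := c.insert (v, e) (c.getD (v, e) 0 - 1) with hc'
          have hnd' : c'.keys.Nodup := PySem.Dict.nodup_keys_insert _ _ _ hnd
          have hpos' : ∀ p, 0 ≤ c'.getD p 0 := by
            intro p
            rw [hc', PySem.Dict.getD_insert]
            split
            · omega
            · exact hpos p
          have hsupp' : ∀ s e', c'.getD (s, e') 0 ≠ 0 → e' ∈ adj.getD s [] := by
            intro s e' hx
            rw [hc', PySem.Dict.getD_insert] at hx
            by_cases hk : (s, e') = (v, e)
            · have hs1 : s = v := congrArg Prod.fst hk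
              have hs2 : e' = e := congrArg Prod.snd hk
              subst hs1
              subst hs2
              exact hsupp _ _ hc0
            · rw [if_neg hk] at hx
              exact hsupp s e' hx
          have main := ih e (used + 1) (path ++ [e]) c' (by omega) (by simp) hnd' hpos' hsupp'
          have hget : c.get? (v, e) = some (c.getD (v, e) 0) := by
            rcases hq : c.get? (v, e) with _ | k
            · exfalso
              apply hc0
              rw [PySem.Dict.getD_eq_get?_getD, hq]
              rfl
            · rw [PySem.Dict.getD_eq_get?_getD, hq]
              rfl
          have hgrpE : pvGrp m c v e
              = (enumT m c' e).map (fun s => e :: s) := by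
            unfold pvGrp
            rw [if_pos hc0]
          cases hmin : PySem.List.min? (enumT m c' e) (fun x => x) with
          | some s =>
            have hr1 : (pvGoB adj n (m + 1) e (used + 1) (path ++ [e]) c').1
                = (path ++ [e]) ++ s := by
              rw [main.1, hmin]
            have hrne : (pvGoB adj n (m + 1) e (used + 1) (path ++ [e]) c').1 ≠ [] := by
              rw [hr1]
              simp
            have hB : pvGoLoopB adj n (m + 1) v used path c (e :: es')
                = pvGoB adj n (m + 1) e (used + 1) (path ++ [e]) c' := by
              rw [pvGoLoopB, if_pos hc0, if_pos hrne]
            have hminGrp : PySem.List.min? (pvGrp m c v e) (fun x => x) = some (e :: s) := by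
              rw [hgrpE, pvMin_map_mono (fun s => e :: s) (fun a b => pvConsLtIff e a b), hmin]
              rfl
            have hdom : ∀ y ∈ es'.flatMap (pvGrp m c v), (e :: s) ≤ y := by
              intro y hy
              obtain ⟨e', he', hy2⟩ := List.mem_flatMap.mp hy
              unfold pvGrp at hy2
              by_cases hz : c.getD (v, e') 0 ≠ 0
              · rw [if_pos hz] at hy2
                obtain ⟨s'', _, rfl⟩ := List.mem_map.mp hy2
                exact le_of_lt (List.cons_lt_cons_iff.mpr (Or.inl (hhd e' he')))
              · rw [if_neg hz] at hy2
                simp at hy2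
            rw [hB, List.flatMap_cons,
              pvMin_append_left (pvGrp m c v e) (es'.flatMap (pvGrp m c v)) (e :: s)
                hminGrp hdom]
            constructor
            · rw [hr1, List.append_assoc, List.singleton_append]
            · intro h
              exact absurd h hrne
          | none =>
            have henum0 : enumT m c' e = [] := (PySem.List.min?_eq_none_iff _ _).mp hmin
            have hr1 : (pvGoB adj n (m + 1) e (used + 1) (path ++ [e]) c').1 = [] := by
              rw [main.1, hmin]
            have hr2 : (pvGoB adj n (m + 1) e (used + 1) (path ++ [e]) c').2 = c' :=
              main.2 hr1
            have hrestore : (pvGoB adj n (m + 1) e (used + 1) (path ++ [e]) c').2.insert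
                (v, e) (c.getD (v, e) 0) = c := by
              rw [hr2, hc', PySem.Dict.insert_insert_self, pvDictInsertSelf c _ _ hnd hget]
            have hB : pvGoLoopB adj n (m + 1) v used path c (e :: es')
                = pvGoLoopB adj n (m + 1) v used path c es' := by
              rw [pvGoLoopB, if_pos hc0, if_neg (by rw [← hc']; simp [hr1]), hrestore]
            have hgrp0 : pvGrp m c v e = [] := by
              rw [hgrpE, henum0]
              rfl
            rw [hB, List.flatMap_cons, hgrp0, List.nil_append]
            exact ihes hpw'
    have hloop := loop (adj.getD v []) (hadjP v)
    have hmemiff : ∀ x, x ∈ (adj.getD v []).flatMap (pvGrp m c v) ↔ x ∈ enumT (m + 1) c v := by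
      intro x
      rw [pvEnum_mem m c v x hnd hpos, List.mem_flatMap]
      constructor
      · rintro ⟨e, _, hx⟩
        refine ⟨e, ?_, hx⟩
        unfold pvGrp at hx
        by_cases hz : c.getD (v, e) 0 ≠ 0
        · exact hz
        · rw [if_neg hz] at hx
          simp at hx
      · rintro ⟨e, hne2, hx⟩
        exact ⟨e, hsupp v e hne2, hx⟩
    rw [pvMin_congr_mem _ _ hmemiff] at hloop
    exact hloop

theorem pvCnt_fold (tickets : List (List String)) :
    tickets.foldl (fun d t =>
      let k := (PySem.List.pyGetD t 0 "", PySem.List.pyGetD t 1 "")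
      d.insert k (d.getD k 0 + 1)) PySem.Dict.empty = pvCntB tickets := by
  rw [show pvCntB tickets = PySem.Dict.counter (tickets.map
      (fun t => (PySem.List.pyGetD t 0 "", PySem.List.pyGetD t 1 ""))) from rfl,
    ← PySem.Dict.foldl_insert_getD_add_one_eq_counter, List.foldl_map]

theorem pvCntPos (tickets : List (List String)) :
    ∀ p, 0 ≤ (pvCntB tickets).getD p 0 := by
  intro p
  rw [show pvCntB tickets = PySem.Dict.counter (tickets.map
      (fun t => (PySem.List.pyGetD t 0 "", PySem.List.pyGetD t 1 ""))) from rfl,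
    PySem.Dict.getD_counter]
  positivity

theorem pvCntSupp (tickets : List (List String)) :
    ∀ s e, (pvCntB tickets).getD (s, e) 0 ≠ 0
      → e ∈ (pvAdjB (pvCntB tickets)).getD s [] := by
  intro s e h
  rw [pvAdjB_mem]
  rw [show pvCntB tickets = PySem.Dict.counter (tickets.map
      (fun t => (PySem.List.pyGetD t 0 "", PySem.List.pyGetD t 1 ""))) from rfl,
    PySem.Dict.getD_counter] at h
  have hcnt : (tickets.map
      (fun t => (PySem.List.pyGetD t 0 "", PySem.List.pyGetD t 1 ""))).count (s, e) ≠ 0 := by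
    intro h0
    rw [h0] at h
    simp at h
  have hmem : (s, e) ∈ tickets.map
      (fun t => (PySem.List.pyGetD t 0 "", PySem.List.pyGetD t 1 "")) :=
    List.count_pos_iff.mp (Nat.pos_of_ne_zero hcnt)
  rw [show (pvCntB tickets).keys = PySem.Set.ofList (tickets.map
      (fun t => (PySem.List.pyGetD t 0 "", PySem.List.pyGetD t 1 ""))) from
    PySem.Dict.keys_counter _]
  exact (PySem.Set.mem_ofList _ _).mpr hmem

theorem alt_eq_ref (tickets : List (List String)) :
    solution_alt tickets = pvAltRef tickets := by
  show (match PySem.List.min?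
      (((PySem.List.pyRange 0 (tickets.length : Int) 1).foldl (fun fr _ => pvStepB fr)
          [(["ICN"], tickets.foldl (fun d t =>
            let k := (PySem.List.pyGetD t 0 "", PySem.List.pyGetD t 1 "")
            d.insert k (d.getD k 0 + 1)) PySem.Dict.empty)]).map (fun st => st.1))
      (fun p => p) with
    | some p => p
    | none => []) = pvAltRef tickets
  rw [pvCnt_fold, pvFoldConstStep pvStepB,
    show (PySem.List.pyRange 0 (tickets.length : Int) 1).length = tickets.length from by
      rw [PySem.List.length_pyRange_one]; simp,
    pvPaths,
    show ([(["ICN"], pvCntB tickets)] : List (List String × PySem.Dict (String × String) Int)).flatMap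
        (fun st => (enumT tickets.length st.2 (PySem.List.pyGetD st.1 (-1) "")).map
          (fun s => st.1 ++ s))
      = (enumT tickets.length (pvCntB tickets) "ICN").map (fun s => ["ICN"] ++ s) from by
      simp [List.flatMap_cons, show PySem.List.pyGetD ["ICN"] (-1) "" = "ICN" from rfl],
    pvMin_map_mono (fun s => ["ICN"] ++ s) (fun a b => pvAppendLtIff ["ICN"] a b)]
  have main := (pvMainMin (pvAdjB (pvCntB tickets)) tickets.length
    (pvAdjB_pairwise tickets) tickets.length "ICN" 0 ["ICN"] (pvCntB tickets)
    (by omega) (by simp) (PySem.Dict.nodup_keys_counter _) (pvCntPos tickets)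
    (pvCntSupp tickets)).1
  show _ = (pvGoB (pvAdjB (pvCntB tickets)) tickets.length (tickets.length + 1)
    "ICN" 0 ["ICN"] (pvCntB tickets)).1
  rw [main]
  cases PySem.List.min? (enumT tickets.length (pvCntB tickets) "ICN") (fun x => x) with
  | none => rfl
  | some s => rfl

-- ===== VERDICT (by name: the statement is the Claim_ definition above) =====
theorem solution_spec : Claim_equal_solution := by
  unfold Claim_equal_solution Spec_solution
  intro tickets _ hpre
  rw [solution_eq_ref tickets hpre, ← alt_eq_ref]
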